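-- pv_equiv track=rewrite | github.com/PythonGoesReddit/Reddit_MDA | Reddit_Bibers_Features.py | feature_57
-- ===== SOURCE A (Python) =====
-- def feature_57(untagged_list):
--     """This function takes a list of words without PoS tags as input and returns the number of items
--     that are suasive verbs."""
--     counter = 0
--     suasiveverbslist = ["agree", "arrange", "ask", "beg", "command", "decide", "demand",
--                         "grant", "insist", "instruct", "ordain", "pledge", "pronounce", "propose", "recommend",
--                         "request", "stipulate", "suggest", "urge"]
--     for item in untagged_list:
--         if item in suasiveverbslist:
--             counter = counter + 1
--         else:
--             pass
--     return(counter)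
-- ===== SOURCE B (Python) =====
-- from collections import Counter
--
-- def feature_57(untagged_list):
--     """Counts suasive verbs by tabulating the input once and summing the
--     frequencies of the fixed verb list."""
--     suasiveverbslist = ["agree", "arrange", "ask", "beg", "command", "decide", "demand",
--                         "grant", "insist", "instruct", "ordain", "pledge", "pronounce", "propose", "recommend",
--                         "request", "stipulate", "suggest", "urge"]
--     freq = Counter(untagged_list)
--     return sum(freq.get(v, 0) for v in suasiveverbslist)
-- ===== Notes on version B (the rewrite author's own statement) =====
-- stated objective: faster
-- what changed: Replaces the per-item membership scan over the 19-verb list with a single Counter tabulation of the input followed by summing the frequencies of the fixed verb list (traversal direction reversed).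
import Mathlib
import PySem

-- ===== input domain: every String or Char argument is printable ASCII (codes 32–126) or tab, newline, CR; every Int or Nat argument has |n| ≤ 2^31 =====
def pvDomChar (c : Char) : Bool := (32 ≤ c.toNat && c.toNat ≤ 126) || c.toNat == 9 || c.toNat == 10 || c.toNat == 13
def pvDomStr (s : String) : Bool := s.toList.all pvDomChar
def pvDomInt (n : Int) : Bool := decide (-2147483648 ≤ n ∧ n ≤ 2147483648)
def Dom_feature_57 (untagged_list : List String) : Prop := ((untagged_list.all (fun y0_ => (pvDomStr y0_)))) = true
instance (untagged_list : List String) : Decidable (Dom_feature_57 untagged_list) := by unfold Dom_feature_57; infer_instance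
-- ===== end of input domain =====

-- B tabulates the input once with a Counter and sums the frequencies of the fixed verb list
-- (alternative decomposition; same result).

def pvSuasiveVerbs : List String :=
  ["agree", "arrange", "ask", "beg", "command", "decide", "demand",
   "grant", "insist", "instruct", "ordain", "pledge", "pronounce", "propose", "recommend",
   "request", "stipulate", "suggest", "urge"]

-- ===== PORT A =====
def feature_57 (untagged_list : List String) : Int :=
  untagged_list.foldl (fun counter item =>
    if pvSuasiveVerbs.contains item then counter + 1 else counter) 0

-- ===== PORT B =====
def feature_57_alt (untagged_list : List String) : Int :=
  let freq : PySem.Dict String Int := PySem.Dict.counter untagged_list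
  pvSuasiveVerbs.foldl (fun acc v => acc + freq.getD v 0) 0

-- ===== PRECONDITION & SPEC =====
def Spec_feature_57 (untagged_list : List String) (out : Int) : Prop := out = feature_57_alt untagged_list
instance (untagged_list : List String) (out : Int) : Decidable (Spec_feature_57 untagged_list out) := by unfold Spec_feature_57; infer_instance

-- ===== CLAIM (what is proved, stated in full; the proofs are below) =====
def Claim_equal_feature_57 : Prop := ∀ (untagged_list : List String), Dom_feature_57 untagged_list → Spec_feature_57 untagged_list (feature_57 untagged_list)

-- ===== LEMMAS AND PROOFS =====

theorem pv_foldl_add_map {α : Type} (f : α → Int) (vs : List α) (c : Int) :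
    vs.foldl (fun a v => a + f v) c = c + (vs.map f).sum := by
  induction vs generalizing c with
  | nil => simp
  | cons v vs ih => simp [List.foldl_cons, ih, add_assoc]

theorem pv_sum_counts (vs : List String) (hnd : vs.Nodup) (xs : List String) :
    (vs.map (fun v => (xs.count v : Int))).sum
      = (xs.countP (fun x => vs.contains x) : Int) := by
  induction xs with
  | nil => simp
  | cons x xs ih =>
    have hcount : ∀ v : String, ((x :: xs).count v : Int)
        = (xs.count v : Int) + (if v == x then 1 else 0) := by
      intro v; rw [List.count_cons]
      by_cases h : v = x
      · simp [h]
      · simp [h]; exact fun e => h e.symm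
    have hsplit : (vs.map (fun v => ((x :: xs).count v : Int))).sum
        = (vs.map (fun v => (xs.count v : Int))).sum
          + (vs.map (fun v => if v == x then (1:Int) else 0)).sum := by
      have hfun : (fun v => ((x :: xs).count v : Int))
          = fun v => (xs.count v : Int) + (if v == x then 1 else 0) := funext hcount
      rw [hfun, ← List.sum_map_add]
    have hind : (vs.map (fun v => if v == x then (1:Int) else 0)).sum
        = if vs.contains x then 1 else 0 := by
      have hc : ∀ (l : List String),
          (l.map (fun v => if v == x then (1:Int) else 0)).sum = (l.count x : Int) := by
        intro l; induction l with
        | nil => simp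
        | cons a l ihl =>
          rw [List.map_cons, List.sum_cons, List.count_cons, ihl]
          by_cases h : a = x
          · simp [h]; ring
          · simp [h]
      rw [hc vs]
      by_cases hx : x ∈ vs
      · rw [List.count_eq_one_of_mem hnd hx]; simp [hx]
      · simp [List.count_eq_zero_of_not_mem hx, hx]
    rw [hsplit, ih, hind]
    by_cases hx : vs.contains x
    · simp [List.countP_cons, hx]
    · simp [List.countP_cons, hx]

theorem pv_A_eq_countP (xs : List String) :
    feature_57 xs = (xs.countP (fun x => pvSuasiveVerbs.contains x) : Int) := by
  unfold feature_57
  rw [PySem.List.foldl_if_add_one]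
  simp only [zero_add]

-- ===== VERDICT (by name: the statement is the Claim_ definition above) =====
theorem feature_57_spec : Claim_equal_feature_57 := by
  intro xs _
  unfold Spec_feature_57 feature_57_alt
  rw [pv_A_eq_countP, pv_foldl_add_map]
  simp only [PySem.Dict.getD_counter]
  rw [pv_sum_counts pvSuasiveVerbs (by decide) xs]
  simp
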